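-- pv_equiv track=rewrite | github.com/SchroederBen/ABJW-Bets | app.py | parse_human_prediction_line
-- ===== SOURCE A (Python) =====
-- def parse_human_prediction_line(line: str):
--     parts = [p.strip() for p in line.split(" | ")]
--
--     data = {
--         "matchup": "",
--         "bet": "",
--         "confidence": "",
--         "edge": "",
--         "projected_margin": "",
--         "fair_home_spread": "",
--         "reason": "",
--         "risk_flags": "",
--     }
--
--     if parts:
--         data["matchup"] = parts[0]
--
--     for part in parts[1:]:
--         if part.startswith("Bet:"):
--             data["bet"] = part.replace("Bet:", "", 1).strip()
--         elif part.startswith("Confidence:"):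
--             data["confidence"] = part.replace("Confidence:", "", 1).strip()
--         elif part.startswith("Estimated Edge:"):
--             data["edge"] = part.replace("Estimated Edge:", "", 1).strip()
--         elif part.startswith("Projected Margin:"):
--             data["projected_margin"] = part.replace("Projected Margin:", "", 1).strip()
--         elif part.startswith("Fair Home Spread:"):
--             data["fair_home_spread"] = part.replace("Fair Home Spread:", "", 1).strip()
--         elif part.startswith("Reason:"):
--             data["reason"] = part.replace("Reason:", "", 1).strip()
--         elif part.startswith("Risk Flags:"):
--             data["risk_flags"] = part.replace("Risk Flags:", "", 1).strip()
--
--     return data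
-- ===== SOURCE B (Python) =====
-- # Field-major parser: instead of one pass over the parts with a 7-way branch,
-- # loop over the 7 fields and for each scan the tail parts backwards for the
-- # last one carrying that label (last occurrence wins, as in A's overwrites).
-- _FIELDS = [
--     ("Bet:", "bet"),
--     ("Confidence:", "confidence"),
--     ("Estimated Edge:", "edge"),
--     ("Projected Margin:", "projected_margin"),
--     ("Fair Home Spread:", "fair_home_spread"),
--     ("Reason:", "reason"),
--     ("Risk Flags:", "risk_flags"),
-- ]
--
--
-- def parse_human_prediction_line(line: str):
--     parts = [p.strip() for p in line.split(" | ")]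
--     rest = parts[1:]
--     data = {"matchup": parts[0] if parts else ""}
--     for prefix, key in _FIELDS:
--         data[key] = next(
--             (p[len(prefix):].strip() for p in reversed(rest) if p.startswith(prefix)),
--             "",
--         )
--     return data
-- ===== Notes on version B (the rewrite author's own statement) =====
-- stated objective: alternative
-- what changed: Inverts the traversal: instead of one part-major pass mutating a dict through a 7-branch elif chain, B loops over the 7 fields and scans the tail parts backwards, taking for each field the last part starting with its label (equivalent because A's later matches overwrite earlier ones and the label prefixes are mutually exclusive).
import Mathlib
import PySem

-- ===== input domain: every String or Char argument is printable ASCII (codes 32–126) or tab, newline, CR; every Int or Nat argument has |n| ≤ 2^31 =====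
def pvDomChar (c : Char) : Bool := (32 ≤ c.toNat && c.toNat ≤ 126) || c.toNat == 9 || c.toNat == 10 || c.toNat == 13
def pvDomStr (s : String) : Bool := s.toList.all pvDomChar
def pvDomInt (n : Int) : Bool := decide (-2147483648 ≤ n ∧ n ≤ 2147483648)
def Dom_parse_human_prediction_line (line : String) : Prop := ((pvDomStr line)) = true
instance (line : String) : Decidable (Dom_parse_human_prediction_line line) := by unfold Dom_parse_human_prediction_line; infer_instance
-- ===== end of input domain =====

-- B inverts the traversal: instead of A's part-major pass updating a dict through a 7-way elif
-- chain, it loops over the 7 fields and takes, per field, the last tail part starting with that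
-- label (objective: alternative); return values proved equal on all of Dom.

-- ===== PORT A =====
-- hand port of s.replace(old, new, 1) (PySem.Str.replace has no count): replace
-- the FIRST occurrence of old (exact, incl. old = "" inserting new at position 0)
def pvReplace1 : List Char → List Char → List Char → List Char
  | [], old, new => if old.isEmpty then new else []
  | c :: rest, old, new =>
      if old.isPrefixOf (c :: rest) then new ++ (c :: rest).drop old.length
      else c :: pvReplace1 rest old new
def pvStepA (d : PySem.Dict String String) (part : List Char) : PySem.Dict String String :=
  if PySem.Chars.startswith part "Bet:".toList then
    d.insert "bet" (String.ofList (PySem.Chars.strip (pvReplace1 part "Bet:".toList [])))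
  else if PySem.Chars.startswith part "Confidence:".toList then
    d.insert "confidence" (String.ofList (PySem.Chars.strip (pvReplace1 part "Confidence:".toList [])))
  else if PySem.Chars.startswith part "Estimated Edge:".toList then
    d.insert "edge" (String.ofList (PySem.Chars.strip (pvReplace1 part "Estimated Edge:".toList [])))
  else if PySem.Chars.startswith part "Projected Margin:".toList then
    d.insert "projected_margin" (String.ofList (PySem.Chars.strip (pvReplace1 part "Projected Margin:".toList [])))
  else if PySem.Chars.startswith part "Fair Home Spread:".toList then
    d.insert "fair_home_spread" (String.ofList (PySem.Chars.strip (pvReplace1 part "Fair Home Spread:".toList [])))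
  else if PySem.Chars.startswith part "Reason:".toList then
    d.insert "reason" (String.ofList (PySem.Chars.strip (pvReplace1 part "Reason:".toList [])))
  else if PySem.Chars.startswith part "Risk Flags:".toList then
    d.insert "risk_flags" (String.ofList (PySem.Chars.strip (pvReplace1 part "Risk Flags:".toList [])))
  else d
def parse_human_prediction_line (line : String) : List (String × String) :=
  let parts := (PySem.Chars.splitOn line.toList " | ".toList).map PySem.Chars.strip
  let data : PySem.Dict String String := PySem.Dict.ofList
    [("matchup", ""), ("bet", ""), ("confidence", ""), ("edge", ""),
     ("projected_margin", ""), ("fair_home_spread", ""), ("reason", ""), ("risk_flags", "")]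
  let data := match parts with              -- if parts: data["matchup"] = parts[0]
    | [] => data
    | p0 :: _ => data.insert "matchup" (String.ofList p0)
  let data := (PySem.List.slice parts (some 1) none).foldl pvStepA data
  data.items

-- ===== PORT B =====
-- B's _FIELDS table (label prefix with colon, output key) and B's
-- next((p[len(prefix):].strip() for p in reversed(rest) if p.startswith(prefix)), "")
def pvFieldsB : List (List Char × String) :=
  [("Bet:".toList, "bet"), ("Confidence:".toList, "confidence"),
   ("Estimated Edge:".toList, "edge"), ("Projected Margin:".toList, "projected_margin"),
   ("Fair Home Spread:".toList, "fair_home_spread"), ("Reason:".toList, "reason"),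
   ("Risk Flags:".toList, "risk_flags")]

def pvFindB (pref : List Char) (rest : List (List Char)) : String :=
  match rest.reverse.find? (fun p => PySem.Chars.startswith p pref) with
  | none => ""
  | some p => String.ofList (PySem.Chars.strip (p.drop pref.length))

def parse_human_prediction_line_alt (line : String) : List (String × String) :=
  let parts := (PySem.Chars.splitOn line.toList " | ".toList).map PySem.Chars.strip
  let rest := PySem.List.slice parts (some 1) none
  let data : PySem.Dict String String := PySem.Dict.ofList
    [("matchup", match parts with | [] => "" | p0 :: _ => String.ofList p0)]
  (pvFieldsB.foldl (fun d lk => d.insert lk.2 (pvFindB lk.1 rest)) data).items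

-- ===== PRECONDITION & SPEC =====
def Spec_parse_human_prediction_line (line : String) (out : List (String × String)) : Prop := out = parse_human_prediction_line_alt line
instance (line : String) (out : List (String × String)) : Decidable (Spec_parse_human_prediction_line line out) := by unfold Spec_parse_human_prediction_line; infer_instance

-- ===== CLAIM (what is proved, stated in full; the proofs are below) =====
def Claim_equal_parse_human_prediction_line : Prop := ∀ (line : String), Dom_parse_human_prediction_line line → Spec_parse_human_prediction_line line (parse_human_prediction_line line)

-- ===== LEMMAS AND PROOFS =====
-- proof-only helpers: split a part at its first ':'; the 8-field dict with explicit values;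
-- one field's "last match wins" update; the same scan phrased left-to-right (A's overwrite order)
def pvPartitionColon : List Char → Option (List Char × List Char)
  | [] => none
  | c :: rest =>
      if c = ':' then some ([], rest)
      else match pvPartitionColon rest with
        | none => none
        | some (a, b) => some (c :: a, b)
def pvMkD (m b c e pm fh r rf : String) : PySem.Dict String String :=
  PySem.Dict.ofList
    [("matchup", m), ("bet", b), ("confidence", c), ("edge", e),
     ("projected_margin", pm), ("fair_home_spread", fh), ("reason", r), ("risk_flags", rf)]
def pvUpd (p pref : List Char) (cur : String) : String :=
  if PySem.Chars.startswith p pref then String.ofList (PySem.Chars.strip (p.drop pref.length)) else cur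
def pvLastB (pref : List Char) (rest : List (List Char)) (d : String) : String :=
  rest.foldl (fun acc p => pvUpd p pref acc) d
lemma pvMkD_mk (m b c e pm fh r rf : String) : pvMkD m b c e pm fh r rf =
    PySem.Dict.mk [("matchup", m), ("bet", b), ("confidence", c), ("edge", e),
     ("projected_margin", pm), ("fair_home_spread", fh), ("reason", r), ("risk_flags", rf)] := by
  simp [pvMkD, PySem.Dict.ofList, PySem.Dict.update, PySem.Dict.insert, PySem.Dict.contains, PySem.Dict.empty]
lemma pvPartition_none {cs : List Char} (h : pvPartitionColon cs = none) : ':' ∉ cs := by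
  induction cs with
  | nil => simp
  | cons c rest ih =>
    simp only [pvPartitionColon] at h
    split at h
    · simp at h
    · rename_i hc
      cases hr : pvPartitionColon rest with
      | none =>
        simp only [List.mem_cons]
        rintro (rfl | hm)
        · exact hc rfl
        · exact ih hr hm
      | some p => obtain ⟨a, b⟩ := p; rw [hr] at h; simp at h
lemma pvPartition_some {cs lab val : List Char}
    (h : pvPartitionColon cs = some (lab, val)) : cs = lab ++ ':' :: val ∧ ':' ∉ lab := by
  induction cs generalizing lab val with
  | nil => simp [pvPartitionColon] at h
  | cons c rest ih =>
    simp only [pvPartitionColon] at h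
    split at h
    · rename_i hc
      simp only [Option.some.injEq, Prod.mk.injEq] at h
      obtain ⟨rfl, rfl⟩ := h
      simp [hc]
    · rename_i hc
      cases hr : pvPartitionColon rest with
      | none => rw [hr] at h; simp at h
      | some p =>
        obtain ⟨a, b⟩ := p
        rw [hr] at h
        simp only [Option.some.injEq, Prod.mk.injEq] at h
        obtain ⟨rfl, rfl⟩ := h
        obtain ⟨h1, h2⟩ := ih hr
        refine ⟨by simp [h1], ?_⟩
        simp only [List.mem_cons]
        rintro (rfl | hm)
        · exact hc rfl
        · exact h2 hm
lemma pvPartition_total (cs : List Char) :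
    pvPartitionColon cs = none ∨ ∃ lab val, pvPartitionColon cs = some (lab, val) := by
  cases h : pvPartitionColon cs with
  | none => exact Or.inl rfl
  | some p => exact Or.inr ⟨p.1, p.2, by simpa using h⟩
lemma pvSw_none {cs p : List Char} (hp : ':' ∈ p) (h : ':' ∉ cs) :
    PySem.Chars.startswith cs p = false := by
  rw [Bool.eq_false_iff]
  intro hsw
  exact h (((PySem.Chars.startswith_iff cs p).mp hsw).subset hp)
lemma pvPrefix_label {L lab val : List Char} (hL : ':' ∉ L) (hlab : ':' ∉ lab)
    (h : L ++ [':'] <+: lab ++ ':' :: val) : lab = L := by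
  induction L generalizing lab with
  | nil =>
    cases lab with
    | nil => rfl
    | cons b lab' =>
      obtain ⟨hb, -⟩ := List.cons_prefix_cons.mp h
      rw [← hb] at hlab
      simp at hlab
  | cons a L' ih =>
    cases lab with
    | nil =>
      obtain ⟨hb, -⟩ := List.cons_prefix_cons.mp h
      rw [hb] at hL
      simp at hL
    | cons b lab' =>
      obtain ⟨hb, htl⟩ := List.cons_prefix_cons.mp h
      have := ih (lab := lab') (fun hm => hL (List.mem_cons_of_mem _ hm))
        (fun hm => hlab (List.mem_cons_of_mem _ hm)) htl
      rw [hb, this]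
lemma pvSw_iff {L lab : List Char} (val : List Char) (hL : ':' ∉ L) (hlab : ':' ∉ lab) :
    PySem.Chars.startswith (lab ++ ':' :: val) (L ++ [':']) = (decide (lab = L)) := by
  by_cases he : lab = L
  · subst he
    simp only [decide_true]
    rw [PySem.Chars.startswith_iff]
    exact ⟨val, by simp⟩
  · simp only [he, decide_false]
    rw [Bool.eq_false_iff]
    intro hsw
    exact he (pvPrefix_label hL hlab ((PySem.Chars.startswith_iff _ _).mp hsw))
lemma pvReplace1_prefix (pre rest : List Char) (hne : pre ≠ []) :
    pvReplace1 (pre ++ rest) pre [] = rest := by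
  cases pre with
  | nil => exact absurd rfl hne
  | cons p pre' => simp [pvReplace1]
lemma pvRepl (L val : List Char) (_hne : L ≠ []) :
    pvReplace1 (L ++ ':' :: val) (L ++ [':']) [] = val := by
  have h : L ++ ':' :: val = (L ++ [':']) ++ val := by simp
  rw [h, pvReplace1_prefix _ _ (by simp)]
lemma pvDrop_label (L val : List Char) : (L ++ ':' :: val).drop (L ++ [':']).length = val := by
  simp
lemma pvIns_bet (m b c e pm fh r rf v : String) :
    (pvMkD m b c e pm fh r rf).insert "bet" v = pvMkD m v c e pm fh r rf := by
  simp [pvMkD_mk, PySem.Dict.insert, PySem.Dict.contains]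

lemma pvIns_confidence (m b c e pm fh r rf v : String) :
    (pvMkD m b c e pm fh r rf).insert "confidence" v = pvMkD m b v e pm fh r rf := by
  simp [pvMkD_mk, PySem.Dict.insert, PySem.Dict.contains]

lemma pvIns_edge (m b c e pm fh r rf v : String) :
    (pvMkD m b c e pm fh r rf).insert "edge" v = pvMkD m b c v pm fh r rf := by
  simp [pvMkD_mk, PySem.Dict.insert, PySem.Dict.contains]

lemma pvIns_projected_margin (m b c e pm fh r rf v : String) :
    (pvMkD m b c e pm fh r rf).insert "projected_margin" v = pvMkD m b c e v fh r rf := by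
  simp [pvMkD_mk, PySem.Dict.insert, PySem.Dict.contains]

lemma pvIns_fair_home_spread (m b c e pm fh r rf v : String) :
    (pvMkD m b c e pm fh r rf).insert "fair_home_spread" v = pvMkD m b c e pm v r rf := by
  simp [pvMkD_mk, PySem.Dict.insert, PySem.Dict.contains]

lemma pvIns_reason (m b c e pm fh r rf v : String) :
    (pvMkD m b c e pm fh r rf).insert "reason" v = pvMkD m b c e pm fh v rf := by
  simp [pvMkD_mk, PySem.Dict.insert, PySem.Dict.contains]

lemma pvIns_risk_flags (m b c e pm fh r rf v : String) :
    (pvMkD m b c e pm fh r rf).insert "risk_flags" v = pvMkD m b c e pm fh r v := by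
  simp [pvMkD_mk, PySem.Dict.insert, PySem.Dict.contains]

lemma pvStepA_mkD (m b c e pm fh r rf : String) (part : List Char) :
    pvStepA (pvMkD m b c e pm fh r rf) part =
      pvMkD m (pvUpd part "Bet:".toList b) (pvUpd part "Confidence:".toList c) (pvUpd part "Estimated Edge:".toList e) (pvUpd part "Projected Margin:".toList pm) (pvUpd part "Fair Home Spread:".toList fh) (pvUpd part "Reason:".toList r) (pvUpd part "Risk Flags:".toList rf) := by
  rcases pvPartition_total part with h | ⟨lab, val, h⟩
  · have hc := pvPartition_none h
    simp only [pvStepA, pvUpd,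
      pvSw_none (p := "Bet:".toList) (by decide) hc,
      pvSw_none (p := "Confidence:".toList) (by decide) hc,
      pvSw_none (p := "Estimated Edge:".toList) (by decide) hc,
      pvSw_none (p := "Projected Margin:".toList) (by decide) hc,
      pvSw_none (p := "Fair Home Spread:".toList) (by decide) hc,
      pvSw_none (p := "Reason:".toList) (by decide) hc,
      pvSw_none (p := "Risk Flags:".toList) (by decide) hc,
      Bool.false_eq_true, if_false]
  · obtain ⟨rfl, hlab⟩ := pvPartition_some h
    have s1 := pvSw_iff (L := "Bet".toList) val (by decide) hlab
    have s2 := pvSw_iff (L := "Confidence".toList) val (by decide) hlab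
    have s3 := pvSw_iff (L := "Estimated Edge".toList) val (by decide) hlab
    have s4 := pvSw_iff (L := "Projected Margin".toList) val (by decide) hlab
    have s5 := pvSw_iff (L := "Fair Home Spread".toList) val (by decide) hlab
    have s6 := pvSw_iff (L := "Reason".toList) val (by decide) hlab
    have s7 := pvSw_iff (L := "Risk Flags".toList) val (by decide) hlab
    simp only [pvStepA, pvUpd]
    rw [show ("Bet:".toList : List Char) = "Bet".toList ++ [':'] from by decide]
    rw [show ("Confidence:".toList : List Char) = "Confidence".toList ++ [':'] from by decide]
    rw [show ("Estimated Edge:".toList : List Char) = "Estimated Edge".toList ++ [':'] from by decide]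
    rw [show ("Projected Margin:".toList : List Char) = "Projected Margin".toList ++ [':'] from by decide]
    rw [show ("Fair Home Spread:".toList : List Char) = "Fair Home Spread".toList ++ [':'] from by decide]
    rw [show ("Reason:".toList : List Char) = "Reason".toList ++ [':'] from by decide]
    rw [show ("Risk Flags:".toList : List Char) = "Risk Flags".toList ++ [':'] from by decide]
    rw [s1, s2, s3, s4, s5, s6, s7]
    by_cases h1 : lab = "Bet".toList
    · subst h1
      rw [pvRepl "Bet".toList val (by decide), pvDrop_label "Bet".toList val]
      simp [show (decide ("Bet".toList = "Bet".toList)) = true from by decide, show (decide ("Bet".toList = "Confidence".toList)) = false from by decide, show (decide ("Bet".toList = "Estimated Edge".toList)) = false from by decide, show (decide ("Bet".toList = "Projected Margin".toList)) = false from by decide, show (decide ("Bet".toList = "Fair Home Spread".toList)) = false from by decide, show (decide ("Bet".toList = "Reason".toList)) = false from by decide, show (decide ("Bet".toList = "Risk Flags".toList)) = false from by decide, pvIns_bet]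
    · by_cases h2 : lab = "Confidence".toList
      · subst h2
        rw [pvRepl "Confidence".toList val (by decide), pvDrop_label "Confidence".toList val]
        simp [show (decide ("Confidence".toList = "Bet".toList)) = false from by decide, show (decide ("Confidence".toList = "Confidence".toList)) = true from by decide, show (decide ("Confidence".toList = "Estimated Edge".toList)) = false from by decide, show (decide ("Confidence".toList = "Projected Margin".toList)) = false from by decide, show (decide ("Confidence".toList = "Fair Home Spread".toList)) = false from by decide, show (decide ("Confidence".toList = "Reason".toList)) = false from by decide, show (decide ("Confidence".toList = "Risk Flags".toList)) = false from by decide, pvIns_confidence]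
      · by_cases h3 : lab = "Estimated Edge".toList
        · subst h3
          rw [pvRepl "Estimated Edge".toList val (by decide), pvDrop_label "Estimated Edge".toList val]
          simp [show (decide ("Estimated Edge".toList = "Bet".toList)) = false from by decide, show (decide ("Estimated Edge".toList = "Confidence".toList)) = false from by decide, show (decide ("Estimated Edge".toList = "Estimated Edge".toList)) = true from by decide, show (decide ("Estimated Edge".toList = "Projected Margin".toList)) = false from by decide, show (decide ("Estimated Edge".toList = "Fair Home Spread".toList)) = false from by decide, show (decide ("Estimated Edge".toList = "Reason".toList)) = false from by decide, show (decide ("Estimated Edge".toList = "Risk Flags".toList)) = false from by decide, pvIns_edge]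
        · by_cases h4 : lab = "Projected Margin".toList
          · subst h4
            rw [pvRepl "Projected Margin".toList val (by decide), pvDrop_label "Projected Margin".toList val]
            simp [show (decide ("Projected Margin".toList = "Bet".toList)) = false from by decide, show (decide ("Projected Margin".toList = "Confidence".toList)) = false from by decide, show (decide ("Projected Margin".toList = "Estimated Edge".toList)) = false from by decide, show (decide ("Projected Margin".toList = "Projected Margin".toList)) = true from by decide, show (decide ("Projected Margin".toList = "Fair Home Spread".toList)) = false from by decide, show (decide ("Projected Margin".toList = "Reason".toList)) = false from by decide, show (decide ("Projected Margin".toList = "Risk Flags".toList)) = false from by decide, pvIns_projected_margin]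
          · by_cases h5 : lab = "Fair Home Spread".toList
            · subst h5
              rw [pvRepl "Fair Home Spread".toList val (by decide), pvDrop_label "Fair Home Spread".toList val]
              simp [show (decide ("Fair Home Spread".toList = "Bet".toList)) = false from by decide, show (decide ("Fair Home Spread".toList = "Confidence".toList)) = false from by decide, show (decide ("Fair Home Spread".toList = "Estimated Edge".toList)) = false from by decide, show (decide ("Fair Home Spread".toList = "Projected Margin".toList)) = false from by decide, show (decide ("Fair Home Spread".toList = "Fair Home Spread".toList)) = true from by decide, show (decide ("Fair Home Spread".toList = "Reason".toList)) = false from by decide, show (decide ("Fair Home Spread".toList = "Risk Flags".toList)) = false from by decide, pvIns_fair_home_spread]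
            · by_cases h6 : lab = "Reason".toList
              · subst h6
                rw [pvRepl "Reason".toList val (by decide), pvDrop_label "Reason".toList val]
                simp [show (decide ("Reason".toList = "Bet".toList)) = false from by decide, show (decide ("Reason".toList = "Confidence".toList)) = false from by decide, show (decide ("Reason".toList = "Estimated Edge".toList)) = false from by decide, show (decide ("Reason".toList = "Projected Margin".toList)) = false from by decide, show (decide ("Reason".toList = "Fair Home Spread".toList)) = false from by decide, show (decide ("Reason".toList = "Reason".toList)) = true from by decide, show (decide ("Reason".toList = "Risk Flags".toList)) = false from by decide, pvIns_reason]
              · by_cases h7 : lab = "Risk Flags".toList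
                · subst h7
                  rw [pvRepl "Risk Flags".toList val (by decide), pvDrop_label "Risk Flags".toList val]
                  simp [show (decide ("Risk Flags".toList = "Bet".toList)) = false from by decide, show (decide ("Risk Flags".toList = "Confidence".toList)) = false from by decide, show (decide ("Risk Flags".toList = "Estimated Edge".toList)) = false from by decide, show (decide ("Risk Flags".toList = "Projected Margin".toList)) = false from by decide, show (decide ("Risk Flags".toList = "Fair Home Spread".toList)) = false from by decide, show (decide ("Risk Flags".toList = "Reason".toList)) = false from by decide, show (decide ("Risk Flags".toList = "Risk Flags".toList)) = true from by decide, pvIns_risk_flags]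
                · simp only [h1, h2, h3, h4, h5, h6, h7, decide_false, Bool.false_eq_true, if_false]

lemma pvFold_mkD (rest : List (List Char)) : ∀ (m b c e pm fh r rf : String),
    rest.foldl pvStepA (pvMkD m b c e pm fh r rf) =
      pvMkD m (pvLastB "Bet:".toList rest b) (pvLastB "Confidence:".toList rest c) (pvLastB "Estimated Edge:".toList rest e) (pvLastB "Projected Margin:".toList rest pm) (pvLastB "Fair Home Spread:".toList rest fh) (pvLastB "Reason:".toList rest r) (pvLastB "Risk Flags:".toList rest rf) := by
  induction rest with
  | nil => intro m b c e pm fh r rf; simp [pvLastB]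
  | cons p t ih =>
    intro m b c e pm fh r rf
    rw [List.foldl_cons, pvStepA_mkD, ih]
    simp only [pvLastB, List.foldl_cons]
lemma pvIns_matchup (m b c e pm fh r rf v : String) :
    (pvMkD m b c e pm fh r rf).insert "matchup" v = pvMkD v b c e pm fh r rf := by
  simp [pvMkD_mk, PySem.Dict.insert, PySem.Dict.contains]

lemma pvLastB_eq_find (pref : List Char) : ∀ (rest : List (List Char)) (d : String),
    pvLastB pref rest d = (match rest.reverse.find? (fun p => PySem.Chars.startswith p pref) with
      | none => d
      | some p => String.ofList (PySem.Chars.strip (p.drop pref.length))) := by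
  intro rest
  induction rest with
  | nil => intro d; rfl
  | cons p t ih =>
    intro d
    rw [show pvLastB pref (p :: t) d = pvLastB pref t (pvUpd p pref d) from rfl, ih]
    simp only [List.reverse_cons]
    rw [List.find?_append]
    cases h : t.reverse.find? (fun q => PySem.Chars.startswith q pref) with
    | some q => simp [h]
    | none =>
      simp only [h, Option.none_or]
      cases hsw : PySem.Chars.startswith p pref with
      | true => simp [List.find?, hsw, pvUpd]
      | false => simp [List.find?, hsw, pvUpd]

lemma pvFindB_eq (pref : List Char) (rest : List (List Char)) :
    pvFindB pref rest = pvLastB pref rest "" := by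
  rw [pvLastB_eq_find]; rfl

lemma pvAltFold (m0 : String) (rest : List (List Char)) :
    (pvFieldsB.foldl (fun d lk => d.insert lk.2 (pvFindB lk.1 rest))
        (PySem.Dict.ofList [("matchup", m0)] : PySem.Dict String String)).items
      = (pvMkD m0 (pvLastB "Bet:".toList rest "") (pvLastB "Confidence:".toList rest "")
          (pvLastB "Estimated Edge:".toList rest "") (pvLastB "Projected Margin:".toList rest "")
          (pvLastB "Fair Home Spread:".toList rest "") (pvLastB "Reason:".toList rest "")
          (pvLastB "Risk Flags:".toList rest "")).items := by
  simp only [pvFieldsB, List.foldl, pvFindB_eq]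
  simp [pvMkD_mk, PySem.Dict.ofList, PySem.Dict.update, PySem.Dict.insert, PySem.Dict.contains, PySem.Dict.empty]


-- ===== VERDICT (by name: the statement is the Claim_ definition above) =====
theorem parse_human_prediction_line_spec : Claim_equal_parse_human_prediction_line := by
  intro line _
  unfold Spec_parse_human_prediction_line parse_human_prediction_line parse_human_prediction_line_alt
  simp only []
  generalize (PySem.Chars.splitOn line.toList " | ".toList).map PySem.Chars.strip = parts
  generalize PySem.List.slice parts (some 1) none = rest
  cases parts with
  | nil =>
    rw [show (PySem.Dict.ofList
       [("matchup", ""), ("bet", ""), ("confidence", ""), ("edge", ""),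
        ("projected_margin", ""), ("fair_home_spread", ""), ("reason", ""), ("risk_flags", "")] : PySem.Dict String String)
      = pvMkD "" "" "" "" "" "" "" "" from rfl, pvFold_mkD, pvAltFold]
  | cons p0 ps =>
    show (List.foldl pvStepA ((pvMkD "" "" "" "" "" "" "" "").insert "matchup" (String.ofList p0)) rest).items
      = (pvFieldsB.foldl (fun d lk => d.insert lk.2 (pvFindB lk.1 rest))
          (PySem.Dict.ofList [("matchup", String.ofList p0)] : PySem.Dict String String)).items
    rw [pvIns_matchup, pvFold_mkD, pvAltFold]
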